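-- pv_equiv track=rewrite | github.com/pypi-data/pypi-mirror-273 | packages/pylmkit/pylmkit-0.0.22.tar.gz/pylmkit-0.0.22/pylmkit/utils/data_utils.py | stream_print
-- ===== SOURCE A (Python) =====
-- def stream_print(string, buffer_size=3):
--     buffer = []
--     for char in string:
--         buffer.append(char)
--         if len(buffer) >= buffer_size:
--             yield ''.join(buffer)
--             buffer.clear()
--     if buffer:
--         yield ''.join(buffer)
-- ===== SOURCE B (Python) =====
-- def stream_print(string, buffer_size=3):
--     size = max(1, buffer_size)
--     rest = string
--     while rest:
--         yield rest[:size]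
--         rest = rest[size:]
-- ===== Notes on version B (the rewrite author's own statement) =====
-- stated objective: idiomatic
-- what changed: Replaces the char-by-char growing/cleared buffer list with direct slicing: repeatedly yield the first max(1, buffer_size) characters of the remaining string, so no per-character Python-level work is done.
import Mathlib
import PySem

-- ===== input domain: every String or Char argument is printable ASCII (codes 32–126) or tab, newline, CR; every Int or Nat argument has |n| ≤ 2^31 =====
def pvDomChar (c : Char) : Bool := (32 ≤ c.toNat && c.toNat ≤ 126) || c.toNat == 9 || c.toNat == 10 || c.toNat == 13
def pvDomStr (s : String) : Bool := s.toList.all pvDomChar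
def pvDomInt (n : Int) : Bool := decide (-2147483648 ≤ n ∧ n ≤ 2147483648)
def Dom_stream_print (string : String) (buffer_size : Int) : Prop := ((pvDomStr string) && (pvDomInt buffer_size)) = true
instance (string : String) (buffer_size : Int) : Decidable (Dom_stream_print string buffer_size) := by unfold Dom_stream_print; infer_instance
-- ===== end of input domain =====

-- B replaces A's per-character buffer accumulation with direct slicing by max(1, buffer_size):
-- same chunk sequence, no per-character buffer state (objective: idiomatic).
-- Both are generators; the list of yielded strings is what is ported and proved equal.

-- ===== PORT A =====
-- A's generator: append each char to `buffer`, yield ''.join(buffer) when len(buffer) >= buffer_size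
-- and clear it, flush the leftover buffer at the end.
def stream_print (string : String) (buffer_size : Int) : List String :=
  let st := string.toList.foldl
    (fun (st : List Char × List String) char =>
      let buffer := st.1 ++ [char]
      if ((buffer.length : Int) ≥ buffer_size) then
        (([] : List Char), st.2 ++ [String.mk buffer])
      else
        (buffer, st.2))
    (([] : List Char), ([] : List String))
  if st.1 ≠ [] then st.2 ++ [String.mk st.1] else st.2

-- ===== PORT B =====
-- B's loop: size = max(1, buffer_size); while rest: yield rest[:size]; rest = rest[size:].
-- With size ≥ 1 the slices rest[:size] / rest[size:] are exactly take size / drop size; the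
-- recursion writes them as c :: rest.take (size-1) / rest.drop (size-1) (equal for size ≥ 1,
-- pvChunks is only applied at size = max(1, buffer_size) ≥ 1) so Lean sees termination.
def pvChunks (size : Nat) : List Char → List String
  | [] => []
  | c :: rest => String.mk (c :: rest.take (size - 1)) :: pvChunks size (rest.drop (size - 1))
  termination_by cs => cs.length
  decreasing_by simp [List.length_drop]

def stream_print_alt (string : String) (buffer_size : Int) : List String :=
  pvChunks (max 1 buffer_size).toNat string.toList

-- ===== PRECONDITION & SPEC =====
def Spec_stream_print (string : String) (buffer_size : Int) (out : List String) : Prop := out = stream_print_alt string buffer_size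
instance (string : String) (buffer_size : Int) (out : List String) : Decidable (Spec_stream_print string buffer_size out) := by unfold Spec_stream_print; infer_instance

-- ===== CLAIM (what is proved, stated in full; the proofs are below) =====
def Claim_equal_stream_print : Prop := ∀ (string : String) (buffer_size : Int), Dom_stream_print string buffer_size → Spec_stream_print string buffer_size (stream_print string buffer_size)

-- ===== LEMMAS AND PROOFS =====

lemma pvChunks_nil (s : Nat) : pvChunks s [] = [] := by rw [pvChunks.eq_def]

lemma pvChunks_cons (s : Nat) (c : Char) (rest : List Char) :
    pvChunks s (c :: rest) = String.mk (c :: rest.take (s - 1)) :: pvChunks s (rest.drop (s - 1)) := by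
  rw [pvChunks.eq_def]

lemma pvChunks_single (s : Nat) (cs : List Char) (hne : cs ≠ []) (hle : cs.length ≤ s) :
    pvChunks s cs = [String.mk cs] := by
  match cs with
  | [] => exact absurd rfl hne
  | c :: rest =>
      rw [pvChunks_cons]
      have h1 : rest.length ≤ s - 1 := by simp at hle; omega
      rw [List.take_of_length_le h1, List.drop_of_length_le h1, pvChunks_nil]

lemma pvChunks_step (s : Nat) (hs : 1 ≤ s) (cs : List Char) (hne : cs ≠ []) :
    pvChunks s cs = String.mk (cs.take s) :: pvChunks s (cs.drop s) := by
  match cs with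
  | [] => exact absurd rfl hne
  | c :: rest =>
      rw [pvChunks_cons]
      obtain ⟨s', rfl⟩ : ∃ s', s = s' + 1 := ⟨s - 1, by omega⟩
      simp [List.take_succ_cons, List.drop_succ_cons]

-- A's loop rephrased as a recursion on the character list (same state transitions), for the proof.
def pvChunksB (s : Nat) (buffer : List Char) : List Char → List String
  | [] => if buffer = [] then [] else [String.mk buffer]
  | c :: cs =>
      if buffer.length + 1 ≥ s then String.mk (buffer ++ [c]) :: pvChunksB s [] cs
      else pvChunksB s (buffer ++ [c]) cs

-- pvChunksB from a partially filled buffer: first chunk completes at s chars, then plain pvChunks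
lemma pvChunksB_char (s : Nat) (hs : 1 ≤ s) :
    ∀ (cs : List Char) (buffer : List Char), buffer.length < s →
      pvChunksB s buffer cs =
        if cs = [] ∧ buffer = [] then []
        else if cs.length < s - buffer.length then [String.mk (buffer ++ cs)]
        else String.mk (buffer ++ cs.take (s - buffer.length)) ::
              pvChunks s (cs.drop (s - buffer.length)) := by
  intro cs
  induction cs with
  | nil =>
      intro buffer hb
      by_cases h : buffer = []
      · simp [pvChunksB, h]
      · have hl : buffer.length ≠ 0 := by simpa using h
        simp only [pvChunksB, if_neg h]
        rw [if_neg (by simp [h]), if_pos (by simp; omega)]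
        simp
  | cons c cs ih =>
      intro buffer hb
      simp only [pvChunksB]
      by_cases h : buffer.length + 1 ≥ s
      · rw [if_pos h, if_neg (show ¬(c :: cs = [] ∧ buffer = []) by simp)]
        have ht : s - buffer.length = 1 := by omega
        rw [if_neg (by simp [ht]), ht]
        simp only [List.take_succ_cons, List.take_zero, List.drop_succ_cons, List.drop_zero]
        congr 1
        rw [ih [] (by simpa using hs)]
        simp only [List.length_nil, Nat.sub_zero, List.nil_append]
        by_cases hnil : cs = []
        · rw [if_pos (by simp [hnil]), hnil, pvChunks_nil]
        · rw [if_neg (by simp [hnil])]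
          by_cases hsh : cs.length < s
          · rw [if_pos hsh, pvChunks_single s cs hnil (by omega)]
          · rw [if_neg hsh, pvChunks_step s hs cs hnil]
      · rw [if_neg h, if_neg (show ¬(c :: cs = [] ∧ buffer = []) by simp)]
        have hlen : (buffer ++ [c]).length < s := by simp; omega
        rw [ih (buffer ++ [c]) hlen, if_neg (show ¬(cs = [] ∧ buffer ++ [c] = []) by simp)]
        simp only [List.length_append, List.length_cons, List.length_nil]
        have hbl : s - buffer.length = (s - (buffer.length + 1)) + 1 := by omega
        by_cases hsmall : cs.length < s - (buffer.length + 1)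
        · rw [if_pos hsmall, if_pos (by omega)]
          simp
        · rw [if_neg hsmall, if_neg (by omega), hbl]
          simp [List.take_succ_cons, List.drop_succ_cons]

lemma pvChunksB_nil_eq (s : Nat) (hs : 1 ≤ s) (cs : List Char) :
    pvChunksB s [] cs = pvChunks s cs := by
  rw [pvChunksB_char s hs cs [] (by simp; omega)]
  simp only [List.length_nil, Nat.sub_zero, List.nil_append]
  by_cases hnil : cs = []
  · rw [if_pos (by simp [hnil]), hnil, pvChunks_nil]
  · rw [if_neg (by simp [hnil])]
    by_cases hsh : cs.length < s
    · rw [if_pos hsh, pvChunks_single s cs hnil (by omega)]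
    · rw [if_neg hsh, pvChunks_step s hs cs hnil]

-- A's fold (with its final flush) computes pvChunksB at chunk size max(1, buffer_size):
-- the yield test len(buffer) ≥ buffer_size fires exactly when the nonempty buffer reaches that size
lemma pvFold_eq_chunksB (bs : Int) (cs : List Char) :
    ∀ (buffer : List Char) (out : List String),
      (let st := cs.foldl
        (fun (st : List Char × List String) char =>
          let buffer := st.1 ++ [char]
          if ((buffer.length : Int) ≥ bs) then
            (([] : List Char), st.2 ++ [String.mk buffer])
          else
            (buffer, st.2))
        (buffer, out)
       if st.1 ≠ [] then st.2 ++ [String.mk st.1] else st.2)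
      = out ++ pvChunksB (max 1 bs).toNat buffer cs := by
  induction cs with
  | nil =>
      intro buffer out
      simp only [List.foldl_nil, pvChunksB]
      by_cases h : buffer = [] <;> simp [h]
  | cons c cs ih =>
      intro buffer out
      simp only [List.foldl_cons, pvChunksB]
      by_cases h : (((buffer ++ [c]).length : Int) ≥ bs)
      · have h' : buffer.length + 1 ≥ (max 1 bs).toNat := by
          simp at h; omega
        rw [if_pos h']
        simp only [if_pos h]
        rw [ih [] (out ++ [String.mk (buffer ++ [c])])]
        simp
      · have h' : ¬ (buffer.length + 1 ≥ (max 1 bs).toNat) := by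
          simp at h ⊢; omega
        rw [if_neg h']
        simp only [if_neg h]
        exact ih (buffer ++ [c]) out

-- ===== VERDICT (by name: the statement is the Claim_ definition above) =====
theorem stream_print_spec : Claim_equal_stream_print := by
  intro string buffer_size _
  unfold Spec_stream_print stream_print stream_print_alt
  rw [pvFold_eq_chunksB buffer_size string.toList [] []]
  rw [pvChunksB_nil_eq _ (by omega) string.toList]
  simp
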